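-- pv_equiv track=rewrite | github.com/LucasConde22/TPs-TDA | Guías/PD/4.py | _recontruir_camino
-- ===== SOURCE A (Python) =====
-- def _recontruir_camino(selecciones):
--     camino = []
--
--     i = len(selecciones) - 1
--     while i >= 0:
--         if i == 0 or selecciones[i] > selecciones[i-1]:
--             camino.append(i)
--             i -= 2
--         else:
--             i -= 1
--     return camino[::-1]
-- ===== SOURCE B (Python) =====
-- def _recontruir_camino(selecciones):
--     # Forward DP: tabla[i] is a persistent linked list (index, rest) of the
--     # chosen indices for the prefix ending at i, cells shared between entries.
--     n = len(selecciones)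
--     tabla = [None] * n
--     for i in range(n):
--         if i == 0 or selecciones[i] > selecciones[i-1]:
--             tabla[i] = (i, tabla[i-2] if i >= 2 else None)
--         else:
--             tabla[i] = tabla[i-1]
--     camino = []
--     celda = tabla[n-1] if n > 0 else None
--     while celda is not None:
--         camino.append(celda[0])
--         celda = celda[1]
--     return camino[::-1]
-- ===== Notes on version B (the rewrite author's own statement) =====
-- stated objective: alternative
-- what changed: Replaces A's backward while loop that jumps the index by 1 or 2 and reverses at the end with a forward dynamic-programming pass filling a table of persistent linked cells (index, rest) shared between entries, then unfolding the cell at the last index to read off the chosen path.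
import Mathlib
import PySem

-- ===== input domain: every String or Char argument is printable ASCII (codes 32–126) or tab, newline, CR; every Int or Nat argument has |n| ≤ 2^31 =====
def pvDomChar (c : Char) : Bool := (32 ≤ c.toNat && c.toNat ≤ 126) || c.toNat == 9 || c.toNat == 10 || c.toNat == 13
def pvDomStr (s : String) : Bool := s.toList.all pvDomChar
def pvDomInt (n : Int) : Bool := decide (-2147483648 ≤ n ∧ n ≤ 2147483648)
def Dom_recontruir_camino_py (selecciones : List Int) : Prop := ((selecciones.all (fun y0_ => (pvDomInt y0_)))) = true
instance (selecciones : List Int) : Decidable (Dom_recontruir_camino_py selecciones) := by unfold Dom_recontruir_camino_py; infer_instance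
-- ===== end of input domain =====

-- B replaces A's backward jumping while loop + final reversal by a forward DP pass that fills
-- a table of persistent linked cells and then unfolds the last cell (objective: alternative).


-- ===== PORT A =====
-- A's while loop: accumulates taken indices (descending) in camino, index drops by 2 on take, 1 on skip.
-- selecciones[i] is always in range (0 ≤ i-1 < i ≤ len-1 where read), so pyGetD … 0 is exact.
def pvLoopA (sel : List Int) (i : Int) (camino : List Int) : List Int :=
  if _h : 0 ≤ i then
    if i = 0 ∨ PySem.List.pyGetD sel (i-1) 0 < PySem.List.pyGetD sel i 0 then
      pvLoopA sel (i-2) (camino ++ [i])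
    else
      pvLoopA sel (i-1) camino
  else camino
termination_by (i+2).toNat
decreasing_by all_goals omega

def recontruir_camino_py (selecciones : List Int) : List Int :=
  (pvLoopA selecciones ((selecciones.length : Int) - 1) []).reverse

-- ===== PORT B =====
-- B's persistent linked cell: Python's None / (index, rest) pairs.
inductive PvCell : Type
  | nil : PvCell
  | cons : Int → PvCell → PvCell
deriving DecidableEq, Repr

-- one iteration of B's forward for-loop over i in range(n); the table is filled left to right,
-- so 'tabla[i] = …' is an append. tabla[i-1]/tabla[i-2] reads are in range where guarded,
-- so pyGetD … nil is exact; likewise selecciones[i]/[i-1].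
def pvStepB (sel : List Int) (t : List PvCell) (i : Int) : List PvCell :=
  if i = 0 ∨ PySem.List.pyGetD sel (i-1) 0 < PySem.List.pyGetD sel i 0 then
    t ++ [PvCell.cons i (if 2 ≤ i then PySem.List.pyGetD t (i-2) PvCell.nil else PvCell.nil)]
  else t ++ [PySem.List.pyGetD t (i-1) PvCell.nil]

def pvTabla (sel : List Int) : List PvCell :=
  (PySem.List.pyRange 0 (sel.length : Int) 1).foldl (pvStepB sel) []

-- B's while loop: camino collects the cell indices in order
def pvUnfold : PvCell → List Int
  | .nil => []
  | .cons i c => i :: pvUnfold c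

def recontruir_camino_py_alt (selecciones : List Int) : List Int :=
  (pvUnfold (if 0 < (selecciones.length : Int) then
      PySem.List.pyGetD (pvTabla selecciones) ((selecciones.length : Int) - 1) PvCell.nil
    else PvCell.nil)).reverse

-- ===== PRECONDITION & SPEC =====
def Spec_recontruir_camino_py (selecciones : List Int) (out : List Int) : Prop := out = recontruir_camino_py_alt selecciones
instance (selecciones : List Int) (out : List Int) : Decidable (Spec_recontruir_camino_py selecciones out) := by unfold Spec_recontruir_camino_py; infer_instance

-- ===== CLAIM (what is proved, stated in full; the proofs are below) =====
def Claim_equal_recontruir_camino_py : Prop := ∀ (selecciones : List Int), Dom_recontruir_camino_py selecciones → Spec_recontruir_camino_py selecciones (recontruir_camino_py selecciones)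

-- ===== LEMMAS AND PROOFS =====
-- Proof-side characterisation: the cell B's table holds at index i (take/skip recursion).
def pvCellSpec (sel : List Int) (i : Int) : PvCell :=
  if _h : i < 0 then .nil
  else if i = 0 ∨ PySem.List.pyGetD sel (i-1) 0 < PySem.List.pyGetD sel i 0 then
    .cons i (pvCellSpec sel (i-2))
  else pvCellSpec sel (i-1)
termination_by (i+2).toNat
decreasing_by all_goals omega

-- Proof-side ascending path (the same take/skip recursion as A, built front-first).
def pvRecB (sel : List Int) (i : Int) : List Int :=
  if _h : i < 0 then []
  else if i = 0 ∨ PySem.List.pyGetD sel (i-1) 0 < PySem.List.pyGetD sel i 0 then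
    pvRecB sel (i-2) ++ [i]
  else pvRecB sel (i-1)
termination_by (i+2).toNat
decreasing_by all_goals omega

-- A's loop equals its accumulator followed by the ascending path, reversed.
theorem pvLoopA_eq (sel : List Int) (n : Nat) :
    ∀ (i : Int) (acc : List Int), (i+2).toNat ≤ n →
      pvLoopA sel i acc = acc ++ (pvRecB sel i).reverse := by
  induction n with
  | zero =>
      intro i acc hn
      rw [pvLoopA, pvRecB]
      simp [show ¬ (0 ≤ i) by omega, show i < 0 by omega]
  | succ n ih =>
      intro i acc hn
      rw [pvLoopA, pvRecB]
      by_cases h0 : 0 ≤ i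
      · rw [dif_pos h0, dif_neg (by omega : ¬ i < 0)]
        by_cases hc : i = 0 ∨ PySem.List.pyGetD sel (i-1) 0 < PySem.List.pyGetD sel i 0
        · rw [if_pos hc, if_pos hc, ih (i-2) (acc ++ [i]) (by omega)]
          simp
        · rw [if_neg hc, if_neg hc, ih (i-1) acc (by omega)]
      · rw [dif_neg h0, dif_pos (by omega : i < 0)]
        simp

-- unfolding a spec cell yields the descending path
theorem pvUnfold_cellSpec (sel : List Int) (n : Nat) :
    ∀ (i : Int), (i+2).toNat ≤ n → pvUnfold (pvCellSpec sel i) = (pvRecB sel i).reverse := by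
  induction n with
  | zero =>
      intro i hn
      rw [pvCellSpec, pvRecB]
      simp [show i < 0 by omega, pvUnfold]
  | succ n ih =>
      intro i hn
      rw [pvCellSpec, pvRecB]
      by_cases h0 : i < 0
      · simp [h0, pvUnfold]
      · rw [dif_neg h0, dif_neg h0]
        by_cases hc : i = 0 ∨ PySem.List.pyGetD sel (i-1) 0 < PySem.List.pyGetD sel i 0
        · rw [if_pos hc, if_pos hc]
          simp [pvUnfold, ih (i-2) (by omega)]
        · rw [if_neg hc, if_neg hc]
          exact ih (i-1) (by omega)

-- reading back an earlier table entry
theorem pvGetD_map_range (f : Nat → PvCell) (k j : Nat) (h : j < k) :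
    PySem.List.pyGetD ((List.range k).map f) (j : Int) PvCell.nil = f j := by
  rw [PySem.List.pyGetD_natCast]
  simp [List.getD, h]

-- the forward fold fills the table with exactly the spec cells
theorem pvTabla_eq (sel : List Int) :
    ∀ (k : Nat),
      (PySem.List.pyRange 0 (k : Int) 1).foldl (pvStepB sel) []
        = (List.range k).map (fun (j : Nat) => pvCellSpec sel (j : Int)) := by
  intro k
  induction k with
  | zero => simp [PySem.List.pyRange_one_eq_nil]
  | succ k ih =>
      have hsplit : PySem.List.pyRange 0 ((k : Int) + 1) 1
          = PySem.List.pyRange 0 (k : Int) 1 ++ [(k : Int)] :=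
        PySem.List.pyRange_one_succ_right (by positivity)
      rw [show ((k + 1 : Nat) : Int) = (k : Int) + 1 by push_cast; ring, hsplit,
        List.foldl_append, ih, List.range_succ, List.map_append]
      simp only [List.foldl_cons, List.foldl_nil, List.map_cons, List.map_nil]
      unfold pvStepB
      by_cases hc : (k : Int) = 0 ∨ PySem.List.pyGetD sel ((k : Int)-1) 0 < PySem.List.pyGetD sel (k : Int) 0
      · rw [if_pos hc]
        congr 1
        rw [pvCellSpec, dif_neg (by omega : ¬ (k : Int) < 0), if_pos hc]
        by_cases h2 : 2 ≤ (k : Int)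
        · rw [if_pos h2, show (k : Int) - 2 = ((k - 2 : Nat) : Int) by omega,
            pvGetD_map_range _ _ _ (by omega)]
        · rw [if_neg h2, pvCellSpec, dif_pos (by omega : (k : Int) - 2 < 0)]
      · rw [if_neg hc]
        congr 1
        rw [pvCellSpec, dif_neg (by omega : ¬ (k : Int) < 0), if_neg hc]
        have hk1 : 1 ≤ k := by
          by_contra h
          exact hc (Or.inl (by omega))
        rw [show (k : Int) - 1 = ((k - 1 : Nat) : Int) by omega,
          pvGetD_map_range _ _ _ (by omega)]

-- ===== VERDICT (by name: the statement is the Claim_ definition above) =====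
theorem recontruir_camino_py_spec : Claim_equal_recontruir_camino_py := by
  intro sel _
  unfold Spec_recontruir_camino_py recontruir_camino_py recontruir_camino_py_alt
  rw [pvLoopA_eq sel ((((sel.length : Int) - 1)+2).toNat) _ [] le_rfl]
  unfold pvTabla
  rw [pvTabla_eq sel sel.length]
  by_cases hn : 0 < (sel.length : Int)
  · rw [if_pos hn, show (sel.length : Int) - 1 = ((sel.length - 1 : Nat) : Int) by omega,
      pvGetD_map_range _ _ _ (by omega),
      pvUnfold_cellSpec sel ((((sel.length - 1 : Nat) : Int))+2).toNat _ le_rfl]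
    simp
  · rw [if_neg hn]
    have : sel.length = 0 := by omega
    rw [this]
    simp [pvUnfold, pvRecB]
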